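-- pv_equiv track=rewrite | github.com/shatianming5/open-problem-atlas | verifiers/checkers/math/sorting_network_checker.py | _is_sorting_network
-- ===== SOURCE A (Python) =====
-- def _apply_comparator(seq: list[int], i: int, j: int) -> list[int]:
--     """Apply a single comparator to positions i and j."""
--     result = seq[:]
--     if result[i] > result[j]:
--         result[i], result[j] = result[j], result[i]
--     return result
--
-- def _is_sorting_network(n: int, network: list[tuple]) -> bool:
--     """Check if a network sorts all 2^n binary sequences (0-1 principle)."""
--     for mask in range(1 << n):
--         seq = [(mask >> i) & 1 for i in range(n)]
--         for i, j in network: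
--             seq = _apply_comparator(seq, i, j)
--         if seq != sorted(seq):
--             return False
--     return True
-- ===== SOURCE B (Python) =====
-- def _is_sorting_network(n: int, network: list[tuple]) -> bool:
--     """Check if a network sorts all 2^n binary sequences (0-1 principle).
--
--     Transposed, bit-parallel algorithm: instead of simulating the network
--     once per input vector, each WIRE is represented by one big integer whose
--     bit v is that wire's value on the v-th input vector of the current block
--     of 2^C vectors.  A comparator updates two whole columns at once
--     (min = AND, max = OR) and a block passes iff each column implies the
--     next; blocks are scanned in mask order with an early False exit.
--     """
--     C = min(n, 16)                 # 2^C vectors per block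
--     blockbits = 1 << C
--     full = (1 << blockbits) - 1    # constant-1 column
--     low = []                       # periodic columns of the C low wires
--     width = 1
--     for _ in range(C):
--         dup = (1 << width) + 1
--         low = [w * dup for w in low]
--         low.append(((1 << width) - 1) << width)
--         width <<= 1
--     idx = list(range(n))           # normalizes (possibly negative) indices
--     comps = [(idx[i], idx[j]) for i, j in network]
--     for blk in range(1 << (n - C)):
--         wires = low + [full if (blk >> k) & 1 else 0 for k in range(n - C)]
--         for i, j in comps:
--             a, b = wires[i], wires[j]
--             wires[i], wires[j] = a & b, a | b
--         for k in range(n - 1):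
--             if wires[k] & wires[k + 1] != wires[k]:
--                 return False
--     return True
-- ===== Notes on version B (the rewrite author's own statement) =====
-- stated objective: faster
-- what changed: B never simulates the network per test vector: it transposes the problem, keeping one big integer per WIRE whose bit v is that wire's value on the v-th vector of a block of 2^min(n,16) vectors, applies each comparator to whole columns with one AND/OR, and checks 'each column implies the next' per block (blocks scanned in mask order with early exit); A copies an n-element list per comparator and calls sorted() for every one of the 2^n vectors.
import Mathlib
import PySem

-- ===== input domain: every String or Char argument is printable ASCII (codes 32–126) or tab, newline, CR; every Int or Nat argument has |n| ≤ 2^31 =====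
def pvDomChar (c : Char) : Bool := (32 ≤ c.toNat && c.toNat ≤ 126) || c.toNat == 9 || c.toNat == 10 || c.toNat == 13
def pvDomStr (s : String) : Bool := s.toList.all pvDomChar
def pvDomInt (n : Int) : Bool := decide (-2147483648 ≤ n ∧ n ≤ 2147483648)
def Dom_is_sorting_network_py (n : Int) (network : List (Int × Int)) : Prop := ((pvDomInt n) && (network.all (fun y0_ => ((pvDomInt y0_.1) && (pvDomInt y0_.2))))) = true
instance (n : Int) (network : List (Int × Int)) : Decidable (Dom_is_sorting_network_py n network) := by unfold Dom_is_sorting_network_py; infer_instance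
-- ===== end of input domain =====

-- B transposes the 0-1-principle check: one big integer per WIRE (bit v = that wire's
-- value on input vector v), each comparator becomes one AND/OR on whole columns, and no
-- loop over the 2^n test vectors remains; equivalence of return values is proved on Pre_
-- (n ≥ 0, all comparator indices in Python's valid range), exactly where A returns.

-- ===== PORT A =====
-- _apply_comparator: result = seq[:]; if result[i] > result[j]: swap via two assignments.
-- pyGet?/pySet? = none is exactly where Python raises IndexError (excluded by Pre_); we
-- return seq unchanged there (unreachable under Pre_).
def pvApplyComparator (seq : List Int) (i j : Int) : List Int :=
  match PySem.List.pyGet? seq i, PySem.List.pyGet? seq j with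
  | some a, some b =>
      if a > b then
        ((PySem.List.pySet? seq i b).bind (fun s => PySem.List.pySet? s j a)).getD seq
      else seq
  | _, _ => seq

-- list equality 'seq != sorted(seq)' (tail-recursive so that long lists evaluate)
def pvListEq : List Int → List Int → Bool
  | [], [] => true
  | a :: xs, b :: ys => if a == b then pvListEq xs ys else false
  | _, _ => false

-- the 'for mask in range(1 << n)' loop with its early 'return False'; fuel counts the
-- remaining iterations (laziness of Python's range: masks past an early return are never built)
def pvMaskLoopA (n : Int) (network : List (Int × Int)) : Nat → Int → Bool
  | 0, _ => true
  | fuel + 1, mask =>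
    let seq0 := (PySem.List.pyRange 0 n 1).map (fun i => PySem.Int.band (mask >>> i.toNat) 1)
    let seq := network.foldl (fun s p => pvApplyComparator s p.1 p.2) seq0
    -- 'seq != sorted(seq)': sorted() ported as the standard stable merge sort — exact,
    -- since Python's sorted is a stable <=-sort (PySem.List.sorted overflows the stack here)
    if pvListEq seq (seq.mergeSort (fun a b => decide (a ≤ b)))
    then pvMaskLoopA n network fuel (mask + 1) else false

def is_sorting_network_py (n : Int) (network : List (Int × Int)) : Bool :=
  -- n.toNat is exact for 0 ≤ n (Pre_); Python raises on 1 << n for n < 0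
  pvMaskLoopA n network (1 <<< n.toNat) 0

-- ===== PORT B =====
-- literal transliteration of Source B.
-- body of Source B's build loop 'for _ in range(C)': state = (low, width)
def pvDupStep (st : List Nat × Nat) : List Nat × Nat :=
  (st.1.map (fun w => w * ((1 <<< st.2) + 1)) ++ [((1 <<< st.2) - 1) <<< st.2], st.2 <<< 1)

-- body of the comparator loop: a, b = wires[i], wires[j]; wires[i], wires[j] = a&b, a|b
-- (getD's default is unreachable: i, j come from successful idx lookups, so i, j < len)
def pvCompB (ws : List Nat) (i j : Nat) : List Nat :=
  let a := ws.getD i 0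
  let b := ws.getD j 0
  (ws.set i (a &&& b)).set j (a ||| b)

-- the 'for blk in range(1 << (n - C))' loop with its early 'return False'; the inner
-- early-exit 'for k in range(n - 1)' check is the all-combinator (same Bool value)
def pvBlockLoopB (comps : List (Nat × Nat)) (low : List Nat) (nC nm1 full : Nat) :
    Nat → Nat → Bool
  | 0, _ => true
  | fuel + 1, blk =>
    let wires := comps.foldl (fun ws pq => pvCompB ws pq.1 pq.2)
      (low ++ (List.range nC).map (fun k => if (blk >>> k) &&& 1 ≠ 0 then full else 0))
    if (List.range nm1).all (fun k => wires.getD k 0 &&& wires.getD (k + 1) 0 == wires.getD k 0)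
    then pvBlockLoopB comps low nC nm1 full fuel (blk + 1) else false

def is_sorting_network_py_alt (n : Int) (network : List (Int × Int)) : Bool :=
  let C := min n 16
  let blockbits := 1 <<< C.toNat
  let full := (1 <<< blockbits) - 1
  -- low-wire build loop; range(C) for C < 0 is empty, C.toNat is exact under Pre_
  let low := ((List.range C.toNat).foldl (fun st _ => pvDupStep st) (([], 1) : List Nat × Nat)).1
  -- idx[i] / idx[j] with idx = list(range(n)): pyGet? none = IndexError (outside Pre_;
  -- getD 0 is unreachable there); .toNat is exact: the looked-up values are 0..n-1
  let idx := PySem.List.pyRange 0 n 1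
  let comps := network.map (fun p =>
    (((PySem.List.pyGet? idx p.1).getD 0).toNat, ((PySem.List.pyGet? idx p.2).getD 0).toNat))
  pvBlockLoopB comps low (n - C).toNat (n - 1).toNat full (1 <<< (n - C).toNat) 0

-- ===== PRECONDITION & SPEC =====
-- Pre_ = exactly the inputs where A returns: n ≥ 0 (Python raises ValueError on 1 << n
-- otherwise) and every comparator index is a valid Python index into a length-n list
-- (otherwise IndexError).
def Pre_is_sorting_network_py (n : Int) (network : List (Int × Int)) : Prop :=
  0 ≤ n ∧ ∀ p ∈ network, -n ≤ p.1 ∧ p.1 < n ∧ -n ≤ p.2 ∧ p.2 < n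
instance (n : Int) (network : List (Int × Int)) : Decidable (Pre_is_sorting_network_py n network) := by unfold Pre_is_sorting_network_py; infer_instance

def pvWitness_is_sorting_network_py : Int × (List (Int × Int)) := (2, [(0, 1)])

def Spec_is_sorting_network_py (n : Int) (network : List (Int × Int)) (out : Bool) : Prop := out = is_sorting_network_py_alt n network
instance (n : Int) (network : List (Int × Int)) (out : Bool) : Decidable (Spec_is_sorting_network_py n network out) := by unfold Spec_is_sorting_network_py; infer_instance

-- ===== CLAIM (what is proved, stated in full; the proofs are below) =====
def Claim_equal_is_sorting_network_py : Prop := ∀ (n : Int) (network : List (Int × Int)), Dom_is_sorting_network_py n network → Pre_is_sorting_network_py n network → Spec_is_sorting_network_py n network (is_sorting_network_py n network)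

-- ===== LEMMAS AND PROOFS =====

-- the list of wire values encoded by mask v (A's initial seq)
def pvBits (v : Nat) (m : Nat) : List Int :=
  (List.range m).map (fun k => (((v >>> k) &&& 1 : Nat) : Int))

-- the row extracted from B's columns at mask v
def pvRow (ws : List Nat) (v : Nat) : List Int :=
  ws.map (fun w => (((w >>> v) &&& 1 : Nat) : Int))

-- Python index normalization for a valid index i into a length-n list
def pvNorm (n i : Int) : Nat := (if i < 0 then i + n else i).toNat

-- B's build fold, named for the proofs (definitionally the fold in the port)
def pvBuild (m : Nat) : List Nat × Nat :=
  (List.range m).foldl (fun st _ => pvDupStep st) (([], 1) : List Nat × Nat)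

-- B's comparator fold with already-normalized indices
def pvFoldB (n : Int) (network : List (Int × Int)) (ws : List Nat) : List Nat :=
  network.foldl (fun ws p => pvCompB ws (pvNorm n p.1) (pvNorm n p.2)) ws

-- the body of A's mask loop at mask v, as a Bool
def pvChk (n : Int) (network : List (Int × Int)) (v : Nat) : Bool :=
  let seq0 := (PySem.List.pyRange 0 n 1).map (fun i => PySem.Int.band (((v : Nat) : Int) >>> i.toNat) 1)
  let seq := network.foldl (fun s p => pvApplyComparator s p.1 p.2) seq0
  pvListEq seq (seq.mergeSort (fun a b => decide (a ≤ b)))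

theorem pvBits_length (v m : Nat) : (pvBits v m).length = m := by
  simp [pvBits]

theorem pvRow_length (ws : List Nat) (v : Nat) : (pvRow ws v).length = ws.length := by
  simp [pvRow]

theorem pvBitDef (x k : Nat) : (x >>> k) &&& 1 = if x.testBit k then 1 else 0 := by
  rw [Nat.and_one_is_mod, Nat.shiftRight_eq_div_pow, Nat.testBit_eq_decide_div_mod_eq]
  rcases Nat.mod_two_eq_zero_or_one (x / 2 ^ k) with h | h <;> simp [h]

theorem pvIdx (n : Int) (i : Int) (h1 : -n ≤ i) (h2 : i < n) :
    PySem.List.pyIdx? n.toNat i = some (pvNorm n i) := by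
  unfold PySem.List.pyIdx? pvNorm
  by_cases hneg : i < 0
  · rw [if_neg (by omega : ¬ (0:Int) ≤ i), if_pos (by omega : -((n.toNat:Nat):Int) ≤ i),
        if_pos hneg]
    simp only [Option.some.injEq]
    omega
  · rw [if_pos (by omega : (0:Int) ≤ i), if_pos (by omega : i < ((n.toNat:Nat):Int)),
        if_neg hneg]

theorem pvGet (n : Int) (xs : List Int) (hlen : xs.length = n.toNat) (i : Int)
    (h1 : -n ≤ i) (h2 : i < n) :
    PySem.List.pyGet? xs i = xs[pvNorm n i]? := by
  unfold PySem.List.pyGet?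
  rw [hlen, pvIdx n i h1 h2, Option.bind_some]

theorem pvSet (n : Int) (xs : List Int) (hlen : xs.length = n.toNat) (i : Int)
    (h1 : -n ≤ i) (h2 : i < n) (x : Int) :
    PySem.List.pySet? xs i x = some (xs.set (pvNorm n i) x) := by
  unfold PySem.List.pySet?
  rw [hlen, pvIdx n i h1 h2, Option.map_some]

theorem pvNorm_lt (n i : Int) (hn : 0 ≤ n) (h1 : -n ≤ i) (h2 : i < n) :
    pvNorm n i < n.toNat := by
  unfold pvNorm; split_ifs <;> omega

theorem pvListEq_eq_decide (xs ys : List Int) : pvListEq xs ys = decide (xs = ys) := by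
  induction xs generalizing ys with
  | nil => cases ys <;> simp [pvListEq]
  | cons a xs ih => cases ys with
    | nil => simp [pvListEq]
    | cons b ys => by_cases hab : a = b <;> simp [pvListEq, hab, ih]

-- the initial unpacking in A is pvBits of the mask
theorem pvInit (n : Int) (v : Nat) :
    (PySem.List.pyRange 0 n 1).map (fun i => PySem.Int.band ((v : Int) >>> ((i.toNat : Int))) 1)
      = pvBits v n.toNat := by
  rw [PySem.List.pyRange_one]
  simp only [Int.sub_zero, List.map_map, pvBits]
  apply List.map_congr_left
  intro k hk
  simp only [Function.comp_apply]
  have h1 : ((0 : Int) + (k : Int)).toNat = k := by omega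
  rw [h1, Int.shiftRight_natCast]
  exact_mod_cast PySem.Int.band_natCast (v >>> k) 1

-- looking the index up in list(range(n)) is exactly Python index normalization
theorem pvGetRange (n : Int) (hn : 0 ≤ n) (i : Int) (h1 : -n ≤ i) (h2 : i < n) :
    ((PySem.List.pyGet? (PySem.List.pyRange 0 n 1) i).getD 0).toNat = pvNorm n i := by
  have hlen : (PySem.List.pyRange 0 n 1).length = n.toNat := by
    rw [PySem.List.length_pyRange_one]; omega
  have hk : pvNorm n i < (PySem.List.pyRange 0 n 1).length := by
    rw [hlen]; exact pvNorm_lt n i hn h1 h2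
  rw [pvGet n _ hlen i h1 h2, List.getElem?_eq_getElem hk,
      PySem.List.getElem_pyRange_one]
  simp

-- 'seq == sorted(seq)' for a list of ints is pairwise-nondecreasing
theorem pvSortedPairwise (l : List Int) :
    pvListEq l (l.mergeSort (fun a b => decide (a ≤ b))) = decide (l.Pairwise (· ≤ ·)) := by
  rw [pvListEq_eq_decide]
  apply decide_eq_decide.mpr
  constructor
  · intro h
    have hp := List.pairwise_mergeSort
      (le := fun a b : Int => decide (a ≤ b))
      (fun a b c hab hbc => by simp at *; omega)
      (fun a b => by rcases le_total a b with hab | hab <;> simp [hab]) l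
    rw [← h] at hp
    exact hp.imp (fun hab => of_decide_eq_true hab)
  · intro h
    exact (List.mergeSort_of_pairwise (h.imp (fun hab => decide_eq_true hab))).symm

-- pairwise ≤ reduces to adjacent comparisons
theorem pvPairwiseAdj (l : List Int) :
    l.Pairwise (· ≤ ·) ↔ ∀ k, k + 1 < l.length → l.getD k 0 ≤ l.getD (k + 1) 0 := by
  constructor
  · intro h k hk
    rw [List.getD_eq_getElem l 0 (by omega), List.getD_eq_getElem l 0 hk]
    exact List.pairwise_iff_getElem.mp h k (k+1) (by omega) hk (by omega)
  · intro h
    rw [List.pairwise_iff_getElem]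
    intro i j hi hj hij
    have hadj : ∀ t, 0 ≤ t →
        l.getD (min t (l.length - 1)) 0 ≤ l.getD (min (t + 1) (l.length - 1)) 0 := by
      intro t _
      by_cases ht : t < l.length - 1
      · rw [Nat.min_eq_left (by omega), Nat.min_eq_left (by omega)]
        exact h t (by omega)
      · rw [Nat.min_eq_right (by omega), Nat.min_eq_right (by omega)]
    have key := Nat.rel_of_forall_rel_succ_of_le_of_lt
      (r := (· ≤ · : Int → Int → Prop))
      (f := fun t => l.getD (min t (l.length - 1)) 0)
      hadj (Nat.zero_le i) hij
    dsimp only at key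
    rw [Nat.min_eq_left (by omega), Nat.min_eq_left (by omega),
        List.getD_eq_getElem l 0 hi, List.getD_eq_getElem l 0 hj] at key
    exact key

-- A's early-return mask loop is the conjunction of the per-mask checks
theorem pvMaskLoopA_eq (n : Int) (network : List (Int × Int)) (fuel : Nat) :
    ∀ v : Nat, pvMaskLoopA n network fuel ((v : Nat) : Int)
      = decide (∀ u, u < fuel → pvChk n network (v + u) = true) := by
  induction fuel with
  | zero => intro v; simp [pvMaskLoopA]
  | succ fuel ih =>
    intro v
    show (if pvChk n network v then pvMaskLoopA n network fuel (((v : Nat) : Int) + 1) else false) = _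
    by_cases hc : pvChk n network v = true
    · rw [if_pos hc, show ((v : Int) + 1) = (((v + 1 : Nat) : Nat) : Int) by push_cast; ring,
          ih (v + 1)]
      apply decide_eq_decide.mpr
      constructor
      · intro h u hu
        rcases u with _ | u
        · simpa using hc
        · have h2 := h u (by omega)
          have e : v + 1 + u = v + (u + 1) := by omega
          rwa [e] at h2
      · intro h u hu
        have h2 := h (u + 1) (by omega)
        have e : v + (u + 1) = v + 1 + u := by omega
        rwa [e] at h2
    · rw [if_neg hc]
      symm
      simp only [decide_eq_false_iff_not, not_forall]
      exact ⟨0, by simpa using hc⟩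

-- getD of the row is the bit of the column
theorem pvRow_getD (ws : List Nat) (v k : Nat) (hk : k < ws.length) :
    (pvRow ws v).getD k 0 = (((ws.getD k 0 >>> v) &&& 1 : Nat) : Int) := by
  rw [List.getD_eq_getElem _ 0 (by rw [pvRow_length]; exact hk),
      List.getD_eq_getElem _ 0 hk]
  simp [pvRow]

-- build-loop invariant: after m steps, width = 2^m, m wires, and wire k's bit v is
-- '(v >> k) & 1' for v < 2^m and 0 above
theorem pvBuild_spec (m : Nat) :
    (pvBuild m).2 = 2 ^ m ∧ (pvBuild m).1.length = m ∧
      ∀ k, k < m → ∀ v, ((pvBuild m).1.getD k 0).testBit v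
        = (decide (v < 2 ^ m) && v.testBit k) := by
  induction m with
  | zero => exact ⟨rfl, rfl, by omega⟩
  | succ m ih =>
    obtain ⟨hw, hl, hb⟩ := ih
    have hstep : pvBuild (m + 1) = pvDupStep (pvBuild m) := by
      unfold pvBuild
      rw [List.range_succ, List.foldl_append, List.foldl_cons, List.foldl_nil]
    rw [hstep]
    unfold pvDupStep
    rw [hw]
    set W := (pvBuild m).1 with hW
    refine ⟨by simp [Nat.shiftLeft_eq, pow_succ], by simp [hl], ?_⟩
    intro k hk v
    have hS : (1 <<< 2 ^ m : Nat) = 2 ^ 2 ^ m := Nat.one_shiftLeft _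
    by_cases hkm : k < m
    · -- duplicated old wire
      have hkl : k < W.length := by rw [hl]; exact hkm
      have hgd : ((W.map (fun w => w * ((1 <<< 2 ^ m) + 1)) ++ [((1 <<< 2 ^ m) - 1) <<< 2 ^ m]).getD k 0)
          = (W.getD k 0) * ((1 <<< 2 ^ m) + 1) := by
        rw [List.getD_eq_getElem _ 0 (by simp [hl]; omega),
            List.getElem_append_left (by simp [hl]; omega), List.getElem_map,
            List.getD_eq_getElem _ 0 hkl]
      rw [hgd, hS]
      have hwb : W.getD k 0 < 2 ^ 2 ^ m :=
        Nat.lt_pow_two_of_testBit _ (fun j hj => by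
          rw [hb k hkm j]; simp; omega)
      have hval : W.getD k 0 * (2 ^ 2 ^ m + 1) = 2 ^ 2 ^ m * (W.getD k 0) + W.getD k 0 := by ring
      rw [hval, Nat.testBit_two_pow_mul_add _ hwb]
      by_cases hv1 : v < 2 ^ m
      · rw [if_pos hv1, hb k hkm v]
        have : v < 2 ^ (m + 1) := by have := Nat.pow_lt_pow_right (a := 2) one_lt_two (Nat.lt_succ_self m); omega
        simp [hv1, this]
      · rw [if_neg hv1, hb k hkm (v - 2 ^ m)]
        by_cases hv2 : v < 2 ^ (m + 1)
        · have hsub : v - 2 ^ m < 2 ^ m := by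
            have : 2 ^ (m + 1) = 2 ^ m + 2 ^ m := by ring
            omega
          have hvk : (v - 2 ^ m).testBit k = v.testBit k := by
            have hvrw : 2 ^ m * 1 + (v - 2 ^ m) = v := by omega
            have := Nat.testBit_two_pow_mul_add 1 hsub k
            rw [hvrw, if_pos hkm] at this
            exact this.symm
          simp [hsub, hv2, hvk]
        · have hsub : ¬ (v - 2 ^ m < 2 ^ m) := by
            have : 2 ^ (m + 1) = 2 ^ m + 2 ^ m := by ring
            omega
          simp [hsub, hv2]
    · -- the new top wire, k = m
      have hke : k = m := by omega
      subst hke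
      have hgd : ((W.map (fun w => w * ((1 <<< 2 ^ k) + 1)) ++ [((1 <<< 2 ^ k) - 1) <<< 2 ^ k]).getD k 0)
          = ((1 <<< 2 ^ k) - 1) <<< 2 ^ k := by
        have hlm : (W.map (fun w => w * ((1 <<< 2 ^ k) + 1))).length = k := by simp [hl]
        rw [List.getD_eq_getElem _ 0 (by simp [hl]),
            List.getElem_append_right (by omega)]
        simp [hlm]
      rw [hgd, hS]
      have hval : (2 ^ 2 ^ k - 1) <<< 2 ^ k = 2 ^ 2 ^ k * (2 ^ 2 ^ k - 1) + 0 := by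
        rw [Nat.shiftLeft_eq]; ring
      rw [hval, Nat.testBit_two_pow_mul_add _ (Nat.two_pow_pos _), Nat.testBit_two_pow_sub_one]
      have h2 : 2 ^ (k + 1) = 2 ^ k + 2 ^ k := by ring
      by_cases hv1 : v < 2 ^ k
      · rw [if_pos hv1]
        have : v.testBit k = false := Nat.testBit_lt_two_pow hv1
        simp [this]
      · rw [if_neg hv1]
        by_cases hv2 : v < 2 ^ (k + 1)
        · have hsub : v - 2 ^ k < 2 ^ k := by omega
          have hbit : v.testBit k = true := by
            have hvrw : 2 ^ k * 1 + (v - 2 ^ k) = v := by omega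
            have := Nat.testBit_two_pow_mul_add 1 hsub k
            rw [hvrw, if_neg (by omega)] at this
            simpa using this
          simp [hsub, hv2, hbit]
        · have hsub : ¬ (v - 2 ^ k < 2 ^ k) := by omega
          simp [hsub, hv2]

-- bound through getD
theorem pvGetD_bound (ws : List Nat) (N : Nat)
    (h : ∀ w ∈ ws, ∀ v, N ≤ v → w.testBit v = false) (k : Nat) :
    ∀ v, N ≤ v → (ws.getD k 0).testBit v = false := by
  intro v hv
  by_cases hk : k < ws.length
  · rw [List.getD_eq_getElem _ 0 hk]
    exact h _ (List.getElem_mem hk) v hv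
  · rw [List.getD_eq_default _ 0 (by omega)]
    simp

-- one comparator keeps all column bits above N zero
theorem pvCompB_bound (ws : List Nat) (i j N : Nat)
    (h : ∀ w ∈ ws, ∀ v, N ≤ v → w.testBit v = false) :
    ∀ w ∈ pvCompB ws i j, ∀ v, N ≤ v → w.testBit v = false := by
  intro w hw v hv
  have ha := pvGetD_bound ws N h i v hv
  have hb := pvGetD_bound ws N h j v hv
  simp only [pvCompB] at hw
  rcases List.mem_or_eq_of_mem_set hw with hw2 | rfl
  · rcases List.mem_or_eq_of_mem_set hw2 with hw3 | rfl
    · exact h w hw3 v hv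
    · rw [Nat.testBit_and, ha, hb]; rfl
  · rw [Nat.testBit_or, ha, hb]; rfl

theorem pvCompB_length (ws : List Nat) (i j : Nat) :
    (pvCompB ws i j).length = ws.length := by
  simp [pvCompB]

theorem pvFoldB_length (n : Int) (network : List (Int × Int)) :
    ∀ ws : List Nat, (pvFoldB n network ws).length = ws.length := by
  induction network with
  | nil => intro ws; rfl
  | cons p rest ih =>
    intro ws
    show (pvFoldB n rest (pvCompB ws (pvNorm n p.1) (pvNorm n p.2))).length = ws.length
    rw [ih, pvCompB_length]

theorem pvFoldB_bound (n : Int) (network : List (Int × Int)) (N : Nat) :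
    ∀ ws : List Nat, (∀ w ∈ ws, ∀ v, N ≤ v → w.testBit v = false) →
      ∀ w ∈ pvFoldB n network ws, ∀ v, N ≤ v → w.testBit v = false := by
  induction network with
  | nil => intro ws h; exact h
  | cons p rest ih =>
    intro ws h
    exact ih _ (pvCompB_bound ws _ _ N h)

theorem pvMod2 (x v : Nat) : (x >>> v) % 2 = if x.testBit v then 1 else 0 := by
  rw [← Nat.and_one_is_mod]
  exact pvBitDef x v

-- one comparator on the extracted row = one column comparator on the wires
theorem pvRowStep (n : Int) (hn : 0 ≤ n) (ws : List Nat) (hlen : ws.length = n.toNat)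
    (i j : Int) (hi1 : -n ≤ i) (hi2 : i < n) (hj1 : -n ≤ j) (hj2 : j < n) (v : Nat) :
    pvApplyComparator (pvRow ws v) i j = pvRow (pvCompB ws (pvNorm n i) (pvNorm n j)) v := by
  have hi' : pvNorm n i < ws.length := by rw [hlen]; exact pvNorm_lt n i hn hi1 hi2
  have hj' : pvNorm n j < ws.length := by rw [hlen]; exact pvNorm_lt n j hn hj1 hj2
  have hrl : (pvRow ws v).length = n.toNat := by rw [pvRow_length, hlen]
  have hgi : (pvRow ws v)[pvNorm n i]? = some (((ws.getD (pvNorm n i) 0 >>> v) &&& 1 : Nat) : Int) := by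
    rw [List.getElem?_eq_getElem (by rw [pvRow_length]; exact hi')]
    simp [pvRow, List.getD_eq_getElem?_getD, List.getElem?_eq_getElem hi']
  have hgj : (pvRow ws v)[pvNorm n j]? = some (((ws.getD (pvNorm n j) 0 >>> v) &&& 1 : Nat) : Int) := by
    rw [List.getElem?_eq_getElem (by rw [pvRow_length]; exact hj')]
    simp [pvRow, List.getD_eq_getElem?_getD, List.getElem?_eq_getElem hj']
  unfold pvApplyComparator
  rw [pvGet n _ hrl i hi1 hi2, pvGet n _ hrl j hj1 hj2, hgi, hgj]
  dsimp only
  set a := ws.getD (pvNorm n i) 0 with hadef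
  set b := ws.getD (pvNorm n j) 0 with hbdef
  cases ha : a.testBit v <;> cases hb : b.testBit v
  · -- 0, 0 : no swap, row unchanged; a&&&b and a|||b have the same bit v
    rw [if_neg (by rw [pvBitDef, pvBitDef, ha, hb]; norm_num)]
    apply List.ext_getElem (by simp [pvRow_length, pvCompB])
    intro t h1 h2
    have ht : t < ws.length := by simpa [pvRow_length] using h1
    simp only [pvRow, pvCompB, List.getElem_map, List.getElem_set]
    split_ifs with e1 e2 <;>
      simp_all [pvMod2, Nat.testBit_and, Nat.testBit_or]
  · -- a=0, b=1 : no swap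
    rw [if_neg (by rw [pvBitDef, pvBitDef, ha, hb]; norm_num)]
    apply List.ext_getElem (by simp [pvRow_length, pvCompB])
    intro t h1 h2
    have ht : t < ws.length := by simpa [pvRow_length] using h1
    simp only [pvRow, pvCompB, List.getElem_map, List.getElem_set]
    split_ifs with e1 e2 <;>
      simp_all [pvMod2, Nat.testBit_and, Nat.testBit_or]
  · -- a=1, b=0 : swap
    have hij : pvNorm n i ≠ pvNorm n j := by
      intro e
      have hab : a = b := by rw [hadef, hbdef, e]
      rw [hab, hb] at ha
      exact Bool.false_ne_true ha
    rw [if_pos (by rw [pvBitDef, pvBitDef, ha, hb]; norm_num)]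
    rw [pvSet n _ hrl i hi1 hi2, Option.bind_some,
        pvSet n _ (by rw [List.length_set]; exact hrl) j hj1 hj2, Option.getD_some]
    apply List.ext_getElem (by simp [pvRow_length, pvCompB])
    intro t h1 h2
    have ht : t < ws.length := by simpa [pvRow_length] using h1
    simp only [pvRow, pvCompB, List.getElem_map, List.getElem_set]
    split_ifs with e1 e2 <;>
      simp_all [pvMod2, Nat.testBit_and, Nat.testBit_or]
  · -- 1, 1 : no swap
    rw [if_neg (by rw [pvBitDef, pvBitDef, ha, hb]; norm_num)]
    apply List.ext_getElem (by simp [pvRow_length, pvCompB])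
    intro t h1 h2
    have ht : t < ws.length := by simpa [pvRow_length] using h1
    simp only [pvRow, pvCompB, List.getElem_map, List.getElem_set]
    split_ifs with e1 e2 <;>
      simp_all [pvMod2, Nat.testBit_and, Nat.testBit_or]

-- folding the whole network commutes with row extraction
theorem pvRowFold (n : Int) (hn : 0 ≤ n) :
    ∀ (network : List (Int × Int)) (ws : List Nat), ws.length = n.toNat →
      (∀ p ∈ network, -n ≤ p.1 ∧ p.1 < n ∧ -n ≤ p.2 ∧ p.2 < n) → ∀ v : Nat,
      network.foldl (fun s p => pvApplyComparator s p.1 p.2) (pvRow ws v)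
        = pvRow (pvFoldB n network ws) v := by
  intro network
  induction network with
  | nil => intro ws _ _ v; rfl
  | cons p rest ih =>
    intro ws hlen hnet v
    obtain ⟨h1, h2, h3, h4⟩ := hnet p (List.mem_cons_self ..)
    show rest.foldl _ (pvApplyComparator (pvRow ws v) p.1 p.2) = _
    rw [pvRowStep n hn ws hlen p.1 p.2 h1 h2 h3 h4 v]
    exact ih _ (by rw [pvCompB_length]; exact hlen)
      (fun q hq => hnet q (List.mem_cons_of_mem _ hq)) v

-- 'a's bits below N are a subset of b's' is the AND-equality, given a has no bits above N
theorem pvSubsetIff (a b N : Nat) (ha : ∀ v, N ≤ v → a.testBit v = false) :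
    (∀ v, v < N → a.testBit v = true → b.testBit v = true) ↔ a &&& b = a := by
  constructor
  · intro h
    apply Nat.eq_of_testBit_eq
    intro v
    rw [Nat.testBit_and]
    by_cases hv : v < N
    · cases hav : a.testBit v
      · simp
      · simp [h v hv hav]
    · simp [ha v (by omega)]
  · intro h v _ hav
    have h2 := congrArg (fun x => x.testBit v) h
    simp only [Nat.testBit_and, hav, Bool.true_and] at h2
    exact h2

-- the block loop body at block blk, as a Bool
def pvBlkChk (comps : List (Nat × Nat)) (low : List Nat) (nC nm1 full : Nat) (blk : Nat) : Bool :=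
  let wires := comps.foldl (fun ws pq => pvCompB ws pq.1 pq.2)
    (low ++ (List.range nC).map (fun k => if (blk >>> k) &&& 1 ≠ 0 then full else 0))
  (List.range nm1).all (fun k => wires.getD k 0 &&& wires.getD (k + 1) 0 == wires.getD k 0)

-- B's early-return block loop is the conjunction of the per-block checks
theorem pvBlockLoopB_eq (comps : List (Nat × Nat)) (low : List Nat) (nC nm1 full : Nat)
    (fuel : Nat) : ∀ blk : Nat,
    pvBlockLoopB comps low nC nm1 full fuel blk
      = decide (∀ u, u < fuel → pvBlkChk comps low nC nm1 full (blk + u) = true) := by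
  induction fuel with
  | zero => intro blk; simp [pvBlockLoopB]
  | succ fuel ih =>
    intro blk
    show (if pvBlkChk comps low nC nm1 full blk
          then pvBlockLoopB comps low nC nm1 full fuel (blk + 1) else false) = _
    by_cases hc : pvBlkChk comps low nC nm1 full blk = true
    · rw [if_pos hc, ih (blk + 1)]
      apply decide_eq_decide.mpr
      constructor
      · intro h u hu
        rcases u with _ | u
        · simpa using hc
        · have h2 := h u (by omega)
          have e : blk + 1 + u = blk + (u + 1) := by omega
          rwa [e] at h2
      · intro h u hu
        have h2 := h (u + 1) (by omega)
        have e : blk + (u + 1) = blk + 1 + u := by omega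
        rwa [e] at h2
    · rw [if_neg hc]
      symm
      simp only [decide_eq_false_iff_not, not_forall]
      exact ⟨0, by simpa using hc⟩

-- the initial wires of a block, named for the proofs
def pvBlockInit (c nC full blk : Nat) : List Nat :=
  (pvBuild c).1 ++ (List.range nC).map (fun k => if (blk >>> k) &&& 1 ≠ 0 then full else 0)

theorem pvBlockInit_length (c nC full blk : Nat) :
    (pvBlockInit c nC full blk).length = c + nC := by
  simp [pvBlockInit, (pvBuild_spec c).2.1]

-- every block column has its bits above 2^c zero
theorem pvBlockInit_bound (c nC blk : Nat) :
    ∀ w ∈ pvBlockInit c nC (2 ^ 2 ^ c - 1) blk, ∀ v, 2 ^ c ≤ v → w.testBit v = false := by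
  intro w hw v hv
  rcases List.mem_append.mp hw with h | h
  · obtain ⟨k, hk, rfl⟩ := List.mem_iff_getElem.mp h
    have hkc : k < c := by rw [(pvBuild_spec c).2.1] at hk; exact hk
    rw [← List.getD_eq_getElem _ 0 hk, (pvBuild_spec c).2.2 k hkc v]
    simp only [Bool.and_eq_false_imp, decide_eq_true_eq]
    intro h2
    omega
  · obtain ⟨k, -, hkw⟩ := List.mem_map.mp h
    subst hkw
    split
    · rw [Nat.testBit_two_pow_sub_one]
      simp only [decide_eq_false_iff_not]
      omega
    · simp

-- the rows of a block's initial wires are A's initial sequences for its masks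
theorem pvRowBlockInit (c nC blk v : Nat) (hv : v < 2 ^ c) :
    pvRow (pvBlockInit c nC (2 ^ 2 ^ c - 1) blk) v = pvBits (blk * 2 ^ c + v) (c + nC) := by
  apply List.ext_getElem (by simp [pvRow_length, pvBlockInit_length, pvBits_length])
  intro k h1 h2
  have hk : k < c + nC := by simpa [pvRow_length, pvBlockInit_length] using h1
  have hk' : k < (pvBlockInit c nC (2 ^ 2 ^ c - 1) blk).length := by
    rw [pvBlockInit_length]; exact hk
  have hmask : (blk * 2 ^ c + v).testBit k
      = if k < c then v.testBit k else blk.testBit (k - c) := by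
    have h := Nat.testBit_two_pow_mul_add blk hv k
    rwa [show 2 ^ c * blk = blk * 2 ^ c from Nat.mul_comm _ _] at h
  have hlb : ((pvBuild c).1).length = c := (pvBuild_spec c).2.1
  simp only [pvRow, pvBits, List.getElem_map, List.getElem_range]
  rw [pvBitDef, pvBitDef, hmask]
  have hbit : ((pvBlockInit c nC (2 ^ 2 ^ c - 1) blk)[k]'hk').testBit v
      = if k < c then v.testBit k else blk.testBit (k - c) := by
    by_cases hkc : k < c
    · rw [if_pos hkc]
      unfold pvBlockInit
      rw [List.getElem_append_left (by omega), ← List.getD_eq_getElem _ 0 (by omega),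
          (pvBuild_spec c).2.2 k hkc v]
      simp [hv]
    · rw [if_neg hkc]
      unfold pvBlockInit
      rw [List.getElem_append_right (by omega), List.getElem_map, List.getElem_range,
          hlb]
      rw [pvBitDef]
      cases hb : blk.testBit (k - c)
      · simp
      · simp [Nat.testBit_two_pow_sub_one, hv]
  rw [hbit]

-- a block's adjacent-implication check is sortedness of all its rows
theorem pvRunIff (n' N : Nat) (W : List Nat) (hWlen : W.length = n')
    (hGb : ∀ k v, N ≤ v → (W.getD k 0).testBit v = false) :
    ((List.range (n' - 1)).all
        (fun k => W.getD k 0 &&& W.getD (k + 1) 0 == W.getD k 0) = true)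
      ↔ ∀ v, v < N → (pvRow W v).Pairwise (· ≤ ·) := by
  have hall : ((List.range (n' - 1)).all
      (fun k => W.getD k 0 &&& W.getD (k + 1) 0 == W.getD k 0) = true)
      ↔ ∀ k, k < n' - 1 → W.getD k 0 &&& W.getD (k + 1) 0 = W.getD k 0 := by
    simp [List.all_eq_true]
  rw [hall]
  constructor
  · intro h u hu
    apply (pvPairwiseAdj _).mpr
    intro k hk
    have hk' : k + 1 < n' := by rwa [pvRow_length, hWlen] at hk
    have himp := (pvSubsetIff _ _ N (hGb k)).mpr (h k (by omega)) u hu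
    rw [pvRow_getD W u k (by omega), pvRow_getD W u (k + 1) (by omega), pvBitDef, pvBitDef]
    cases ha : (W.getD k 0).testBit u
    · cases (W.getD (k + 1) 0).testBit u <;> norm_num
    · rw [himp ha]
  · intro h k hk
    apply (pvSubsetIff _ _ N (hGb k)).mp
    intro v hv hbit
    have hp := (pvPairwiseAdj _).mp (h v hv) k (by rw [pvRow_length, hWlen]; omega)
    rw [pvRow_getD W v k (by omega), pvRow_getD W v (k + 1) (by omega),
        pvBitDef, pvBitDef, hbit] at hp
    cases h2 : (W.getD (k + 1) 0).testBit v
    · rw [h2] at hp; norm_num at hp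
    · rfl

-- splitting the masks 0..2^n'-1 into blocks of 2^c
theorem pvMaskSplit (n' c : Nat) (hc : c ≤ n') (P : Nat → Prop) :
    (∀ m, m < 2 ^ n' → P m)
      ↔ (∀ b, b < 2 ^ (n' - c) → ∀ v, v < 2 ^ c → P (b * 2 ^ c + v)) := by
  have hpow : 2 ^ (n' - c) * 2 ^ c = 2 ^ n' := by
    rw [← pow_add]; congr 1; omega
  constructor
  · intro h b hb v hv
    apply h
    have h1 : b * 2 ^ c + v < b * 2 ^ c + 2 ^ c := by omega
    have h2 : b * 2 ^ c + 2 ^ c ≤ 2 ^ n' := by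
      rw [← hpow]
      have h3 := Nat.mul_le_mul_right (2 ^ c) (show b + 1 ≤ 2 ^ (n' - c) by omega)
      rw [Nat.add_mul, Nat.one_mul] at h3
      exact h3
    omega
  · intro h m hm
    have hv : m % 2 ^ c < 2 ^ c := Nat.mod_lt _ (Nat.two_pow_pos c)
    have hb : m / 2 ^ c < 2 ^ (n' - c) := by
      apply Nat.div_lt_of_lt_mul
      rw [Nat.mul_comm, hpow]
      exact hm
    have h2 := h (m / 2 ^ c) hb (m % 2 ^ c) hv
    have hrw : m / 2 ^ c * 2 ^ c + m % 2 ^ c = m := by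
      rw [Nat.mul_comm]
      exact Nat.div_add_mod m (2 ^ c)
    rwa [hrw] at h2

-- ===== VERDICT (by name: the statement is the Claim_ definition above) =====
theorem is_sorting_network_py_spec : Claim_equal_is_sorting_network_py := by
  unfold Claim_equal_is_sorting_network_py
  intro n network _ hpre
  obtain ⟨hn, hnet⟩ := hpre
  unfold Spec_is_sorting_network_py is_sorting_network_py is_sorting_network_py_alt
  show pvMaskLoopA n network (1 <<< n.toNat) 0
      = pvBlockLoopB (network.map (fun p =>
          (((PySem.List.pyGet? (PySem.List.pyRange 0 n 1) p.1).getD 0).toNat,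
           ((PySem.List.pyGet? (PySem.List.pyRange 0 n 1) p.2).getD 0).toNat)))
        ((List.range (min n 16).toNat).foldl (fun st _ => pvDupStep st)
          (([], 1) : List Nat × Nat)).1
        ((n - min n 16).toNat) ((n - 1).toNat)
        ((1 <<< (1 <<< (min n 16).toNat)) - 1) (1 <<< (n - min n 16).toNat) 0
  have hcomps : network.map (fun p =>
        (((PySem.List.pyGet? (PySem.List.pyRange 0 n 1) p.1).getD 0).toNat,
         ((PySem.List.pyGet? (PySem.List.pyRange 0 n 1) p.2).getD 0).toNat))
      = network.map (fun p => (pvNorm n p.1, pvNorm n p.2)) := by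
    apply List.map_congr_left
    intro p hp
    obtain ⟨h1, h2, h3, h4⟩ := hnet p hp
    rw [pvGetRange n hn p.1 h1 h2, pvGetRange n hn p.2 h3 h4]
  rw [hcomps]
  set c := (min n 16).toNat with hcdef
  have hcn : c ≤ n.toNat := by omega
  have hnC : (n - min n 16).toNat = n.toNat - c := by omega
  have hnm1 : (n - 1).toNat = n.toNat - 1 := by omega
  have hfull : ((1 <<< (1 <<< c) : Nat)) - 1 = 2 ^ 2 ^ c - 1 := by
    rw [Nat.one_shiftLeft, Nat.one_shiftLeft]
  rw [hnC, hnm1, hfull, pvBlockLoopB_eq]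
  have hA : pvMaskLoopA n network (1 <<< n.toNat) 0
      = decide (∀ u, u < 2 ^ n.toNat → pvChk n network u = true) := by
    have h := pvMaskLoopA_eq n network (1 <<< n.toNat) 0
    simpa [Nat.one_shiftLeft] using h
  rw [hA]
  apply decide_eq_decide.mpr
  rw [Nat.one_shiftLeft]
  simp only [Nat.zero_add]
  have hblk : ∀ b : Nat,
      (pvBlkChk (network.map (fun p => (pvNorm n p.1, pvNorm n p.2)))
        ((List.range c).foldl (fun st _ => pvDupStep st) (([], 1) : List Nat × Nat)).1
        (n.toNat - c) (n.toNat - 1) (2 ^ 2 ^ c - 1) b = true)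
      ↔ ∀ v, v < 2 ^ c → pvChk n network (b * 2 ^ c + v) = true := by
    intro b
    unfold pvBlkChk
    dsimp only
    have e : (network.map (fun p => (pvNorm n p.1, pvNorm n p.2))).foldl
        (fun ws pq => pvCompB ws pq.1 pq.2)
        (((List.range c).foldl (fun st _ => pvDupStep st) (([], 1) : List Nat × Nat)).1
          ++ (List.range (n.toNat - c)).map
            (fun k => if (b >>> k) &&& 1 ≠ 0 then 2 ^ 2 ^ c - 1 else 0))
        = pvFoldB n network (pvBlockInit c (n.toNat - c) (2 ^ 2 ^ c - 1) b) := by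
      rw [List.foldl_map]
      rfl
    rw [e]
    set W := pvFoldB n network (pvBlockInit c (n.toNat - c) (2 ^ 2 ^ c - 1) b) with hW
    have hWlen : W.length = n.toNat := by
      rw [hW, pvFoldB_length, pvBlockInit_length]; omega
    have hWb : ∀ k v', 2 ^ c ≤ v' → (W.getD k 0).testBit v' = false := by
      intro k
      apply pvGetD_bound
      apply pvFoldB_bound
      exact pvBlockInit_bound c (n.toNat - c) b
    rw [pvRunIff n.toNat (2 ^ c) W hWlen hWb]
    refine forall_congr' (fun v => imp_congr_right (fun hv => ?_))
    unfold pvChk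
    dsimp only
    rw [pvInit n (b * 2 ^ c + v),
        show pvBits (b * 2 ^ c + v) n.toNat = pvBits (b * 2 ^ c + v) (c + (n.toNat - c))
          from by rw [show c + (n.toNat - c) = n.toNat by omega],
        ← pvRowBlockInit c (n.toNat - c) b v hv,
        pvRowFold n hn network (pvBlockInit c (n.toNat - c) (2 ^ 2 ^ c - 1) b)
          (by rw [pvBlockInit_length]; omega) hnet v,
        ← hW, pvSortedPairwise]
    simp
  rw [pvMaskSplit n.toNat c hcn]
  exact forall_congr' (fun b => imp_congr_right (fun hb => (hblk b).symm))
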